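-- pv_equiv track=rewrite | github.com/NoamTAU/sequential-steering-diffusion | scripts/check_steering_pilot_status.py | count_common_images
-- ===== SOURCE A (Python) =====
-- def normalize_repeat(value: str):
--     if value is None:
--         return None
--     value = str(value).strip()
--     if not value:
--         return None
--     try:
--         return int(value)
--     except ValueError:
--         return None
--
-- def unique_repeat_count(rows: list[dict]) -> int:
--     repeats = {normalize_repeat(row.get("repeat_index")) for row in rows}
--     repeats.discard(None)
--     if repeats:
--         return len(repeats)
--     return len(rows)
--
-- def count_common_images(meta_by_image, dog_by_combo, threshold: int):
--     dog_best_by_image = {}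
--     for (image_name, orig_idx, target_idx), rows in dog_by_combo.items():
--         repeats = unique_repeat_count(rows)
--         current = dog_best_by_image.get(image_name)
--         candidate = (repeats, orig_idx, target_idx)
--         if current is None or candidate > current:
--             dog_best_by_image[image_name] = candidate
--     total = 0
--     for image_name, meta_rows in meta_by_image.items():
--         if unique_repeat_count(meta_rows) < threshold:
--             continue
--         dog_info = dog_best_by_image.get(image_name)
--         if dog_info and dog_info[0] >= threshold:
--             total += 1
--     return total
-- ===== SOURCE B (Python) =====
-- def normalize_repeat(value: str):
--     if value is None:
--         return None
--     value = str(value).strip()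
--     if not value:
--         return None
--     try:
--         return int(value)
--     except ValueError:
--         return None
--
-- def unique_repeat_count(rows: list[dict]) -> int:
--     repeats = {normalize_repeat(row.get("repeat_index")) for row in rows}
--     repeats.discard(None)
--     if repeats:
--         return len(repeats)
--     return len(rows)
--
-- def count_common_images(meta_by_image, dog_by_combo, threshold: int):
--     dog_ok = {image_name
--               for (image_name, _orig, _target), rows in dog_by_combo.items()
--               if unique_repeat_count(rows) >= threshold}
--     return sum(1 for image_name, rows in meta_by_image.items()
--                if unique_repeat_count(rows) >= threshold and image_name in dog_ok)
-- ===== Notes on version B (the rewrite author's own statement) =====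
-- stated objective: simpler
-- what changed: Replaced A's per-image lexicographic best-(repeats, orig_idx, target_idx) dict reduction with two direct passes: a set of dog-qualifying image names and a count of meta entries that qualify and are in that set, dropping the never-used orig_idx/target_idx tie-breaking entirely.
import Mathlib
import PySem

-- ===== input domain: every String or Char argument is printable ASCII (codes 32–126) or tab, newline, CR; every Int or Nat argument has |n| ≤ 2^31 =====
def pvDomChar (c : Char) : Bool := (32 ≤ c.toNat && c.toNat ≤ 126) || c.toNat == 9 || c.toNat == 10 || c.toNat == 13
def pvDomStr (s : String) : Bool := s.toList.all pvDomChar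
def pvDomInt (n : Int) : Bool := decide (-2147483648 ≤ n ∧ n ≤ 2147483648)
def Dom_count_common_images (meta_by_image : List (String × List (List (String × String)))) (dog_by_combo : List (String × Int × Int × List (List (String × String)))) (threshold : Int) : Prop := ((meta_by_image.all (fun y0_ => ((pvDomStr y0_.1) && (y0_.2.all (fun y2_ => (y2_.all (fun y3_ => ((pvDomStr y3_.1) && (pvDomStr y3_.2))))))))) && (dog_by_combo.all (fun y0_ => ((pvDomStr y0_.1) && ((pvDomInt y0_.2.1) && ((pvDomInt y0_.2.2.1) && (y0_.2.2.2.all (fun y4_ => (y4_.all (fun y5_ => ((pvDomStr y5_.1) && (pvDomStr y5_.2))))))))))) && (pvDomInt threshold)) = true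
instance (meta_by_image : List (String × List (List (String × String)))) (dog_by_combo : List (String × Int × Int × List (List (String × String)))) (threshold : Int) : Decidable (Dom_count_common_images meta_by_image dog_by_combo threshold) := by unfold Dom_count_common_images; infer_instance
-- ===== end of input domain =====

-- ===== PORT A =====
-- Header: B replaces A's per-image lexicographic best-candidate dict with two qualifying-image
-- passes (a set and a counting scan); objective: simpler decomposition, same results.

-- shared module helpers (used verbatim by both Pythons)
def normalizeRepeat (value : Option String) : Option Int :=
  match value with
  | none => none
  | some v =>
    let v := PySem.Str.strip v
    if v = "" then none
    else
      match PySem.Int.ofStr? v with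
      | some n => some n
      | none => none

def uniqueRepeatCount (rows : List (List (String × String))) : Int :=
  let repeats : PySem.Set (Option Int) :=
    PySem.Set.ofList (rows.map (fun row => normalizeRepeat (PySem.Dict.get? (PySem.Dict.mk row) "repeat_index")))
  let repeats := PySem.Set.discard repeats none
  if repeats ≠ [] then PySem.Set.len repeats else (rows.length : Int)

-- Python tuple comparison 'candidate > current' on (int, int, int), lexicographic
def tripleGt (a b : Int × Int × Int) : Bool :=
  a.1 > b.1 || (a.1 == b.1 && (a.2.1 > b.2.1 || (a.2.1 == b.2.1 && a.2.2 > b.2.2)))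

def count_common_images (meta_by_image : List (String × List (List (String × String)))) (dog_by_combo : List (String × Int × Int × List (List (String × String)))) (threshold : Int) : Int :=
  let dog_best_by_image : PySem.Dict String (Int × Int × Int) :=
    dog_by_combo.foldl (fun d entry =>
      let image_name := entry.1
      let orig_idx := entry.2.1
      let target_idx := entry.2.2.1
      let rows := entry.2.2.2
      let repeats := uniqueRepeatCount rows
      let candidate := (repeats, orig_idx, target_idx)
      match PySem.Dict.get? d image_name with
      | none => PySem.Dict.insert d image_name candidate
      | some current =>
        if tripleGt candidate current then PySem.Dict.insert d image_name candidate else d)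
      PySem.Dict.empty
  meta_by_image.foldl (fun total entry =>
      let image_name := entry.1
      let meta_rows := entry.2
      if uniqueRepeatCount meta_rows < threshold then total
      else
        match PySem.Dict.get? dog_best_by_image image_name with
        | some dog_info => if dog_info.1 ≥ threshold then total + 1 else total
        | none => total)
    0

-- ===== PORT B =====
def count_common_images_alt (meta_by_image : List (String × List (List (String × String)))) (dog_by_combo : List (String × Int × Int × List (List (String × String)))) (threshold : Int) : Int :=
  let dog_ok : PySem.Set String :=
    dog_by_combo.foldl (fun s entry =>
      if uniqueRepeatCount entry.2.2.2 ≥ threshold then PySem.Set.add s entry.1 else s)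
      PySem.Set.empty
  meta_by_image.foldl (fun total entry =>
      if uniqueRepeatCount entry.2 ≥ threshold && PySem.Set.contains dog_ok entry.1
      then total + 1 else total)
    0
-- ===== PRECONDITION & SPEC =====
def Spec_count_common_images (meta_by_image : List (String × List (List (String × String)))) (dog_by_combo : List (String × Int × Int × List (List (String × String)))) (threshold : Int) (out : Int) : Prop := out = count_common_images_alt meta_by_image dog_by_combo threshold
instance (meta_by_image : List (String × List (List (String × String)))) (dog_by_combo : List (String × Int × Int × List (List (String × String)))) (threshold : Int) (out : Int) : Decidable (Spec_count_common_images meta_by_image dog_by_combo threshold out) := by unfold Spec_count_common_images; infer_instance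

-- ===== CLAIM (what is proved, stated in full; the proofs are below) =====
def Claim_equal_count_common_images : Prop := ∀ (meta_by_image : List (String × List (List (String × String)))) (dog_by_combo : List (String × Int × Int × List (List (String × String)))) (threshold : Int), Dom_count_common_images meta_by_image dog_by_combo threshold → Spec_count_common_images meta_by_image dog_by_combo threshold (count_common_images meta_by_image dog_by_combo threshold)

-- ===== LEMMAS AND PROOFS =====

-- "image img currently qualifies" according to A's best-candidate dict
def qualA (threshold : Int) (d : PySem.Dict String (Int × Int × Int)) (img : String) : Bool :=
  match PySem.Dict.get? d img with
  | some info => decide (info.1 ≥ threshold)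
  | none => false

theorem contains_add_eq (s : PySem.Set String) (x y : String) :
    (PySem.Set.add s x).contains y = (s.contains y || decide (y = x)) := by
  by_cases hx : x ∈ s
  · rw [PySem.Set.add_of_mem hx]
    by_cases hyx : y = x
    · subst hyx
      simp [hx]
    · simp [hyx]
  · rw [PySem.Set.add_of_not_mem hx]
    simp

theorem tripleGt_fst_le {a b : Int × Int × Int} (h : tripleGt a b = true) : b.1 ≤ a.1 := by
  simp only [tripleGt, Bool.or_eq_true, Bool.and_eq_true, decide_eq_true_eq, beq_iff_eq] at h
  omega

theorem tripleGt_false_fst_le {a b : Int × Int × Int} (h : tripleGt a b = false) : a.1 ≤ b.1 := by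
  simp only [tripleGt, Bool.or_eq_false_iff, Bool.and_eq_false_iff, decide_eq_false_iff_not,
    beq_eq_false_iff_ne, ne_eq, not_lt] at h
  rcases h with ⟨h1, h2⟩
  omega

theorem dog_inv (threshold : Int) (dog : List (String × Int × Int × List (List (String × String))))
    (d : PySem.Dict String (Int × Int × Int)) (s : PySem.Set String)
    (h : ∀ img, qualA threshold d img = PySem.Set.contains s img) :
    ∀ img,
      qualA threshold
        (dog.foldl (fun d entry =>
          let image_name := entry.1
          let orig_idx := entry.2.1
          let target_idx := entry.2.2.1
          let rows := entry.2.2.2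
          let repeats := uniqueRepeatCount rows
          let candidate := (repeats, orig_idx, target_idx)
          match PySem.Dict.get? d image_name with
          | none => PySem.Dict.insert d image_name candidate
          | some current =>
            if tripleGt candidate current then PySem.Dict.insert d image_name candidate else d) d) img
      = PySem.Set.contains
          (dog.foldl (fun s entry =>
            if uniqueRepeatCount entry.2.2.2 ≥ threshold then PySem.Set.add s entry.1 else s) s) img := by
  induction dog generalizing d s with
  | nil => simpa using h
  | cons e rest ih =>
    simp only [List.foldl_cons]
    apply ih
    intro img
    obtain ⟨img0, oi, ti, rows⟩ := e
    simp only
    by_cases hmem : img = img0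
    · subst hmem
      have hq := h img
      cases hget : PySem.Dict.get? d img with
      | none =>
        simp only [hget]
        have h0 : qualA threshold d img = false := by unfold qualA; rw [hget]
        rw [h0] at hq
        have hs : img ∉ s := by simpa using hq.symm
        by_cases hr : uniqueRepeatCount rows ≥ threshold
        · simp [qualA, PySem.Dict.get?_insert_self, hr, contains_add_eq, hs]
        · simp [qualA, PySem.Dict.get?_insert_self, hr, hs]
      | some cur =>
        simp only [hget]
        have hcur : PySem.Set.contains s img = decide (cur.1 ≥ threshold) := by
          rw [← hq]; simp [qualA, hget]
        by_cases hgt : tripleGt (uniqueRepeatCount rows, oi, ti) cur = true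
        · have hle : cur.1 ≤ uniqueRepeatCount rows := tripleGt_fst_le hgt
          by_cases hr : uniqueRepeatCount rows ≥ threshold
          · simp [hgt, qualA, PySem.Dict.get?_insert_self, hr, contains_add_eq]
          · have hc : ¬ (cur.1 ≥ threshold) := by omega
            have hs : img ∉ s := by simp [hc] at hcur; simpa using hcur
            simp [hgt, qualA, PySem.Dict.get?_insert_self, hr, hs]
        · have hle : uniqueRepeatCount rows ≤ cur.1 :=
            tripleGt_false_fst_le (by simpa using hgt)
          by_cases hr : uniqueRepeatCount rows ≥ threshold
          · have hc : cur.1 ≥ threshold := by omega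
            have hs : img ∈ s := by simp [hc] at hcur; simpa using hcur
            simp [hgt, qualA, hget, hr, contains_add_eq, hc, hs]
          · rw [if_neg hgt, if_neg hr]
            exact hq
    · have hne : img ≠ img0 := hmem
      have hB : ∀ s' : PySem.Set String,
          PySem.Set.contains (if uniqueRepeatCount rows ≥ threshold
            then PySem.Set.add s' img0 else s') img = PySem.Set.contains s' img := by
        intro s'
        by_cases hr : uniqueRepeatCount rows ≥ threshold
        · simp [hr, contains_add_eq, hne]
        · simp [hr]
      rw [hB]
      cases hget : PySem.Dict.get? d img0 with
      | none =>
        simp only [hget]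
        rw [← h img]
        simp [qualA, PySem.Dict.get?_insert_of_ne _ _ hne]
      | some cur =>
        simp only [hget]
        by_cases hgt : tripleGt (uniqueRepeatCount rows, oi, ti) cur = true
        · rw [← h img]
          simp [hgt, qualA, PySem.Dict.get?_insert_of_ne _ _ hne]
        · simp only [hgt]
          rw [← h img]
          simp [hgt]

theorem meta_eq (threshold : Int) (best : PySem.Dict String (Int × Int × Int))
    (dogOk : PySem.Set String)
    (h : ∀ img, qualA threshold best img = PySem.Set.contains dogOk img) :
    ∀ (metaL : List (String × List (List (String × String)))) (t : Int),
      metaL.foldl (fun total entry =>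
        let image_name := entry.1
        let meta_rows := entry.2
        if uniqueRepeatCount meta_rows < threshold then total
        else
          match PySem.Dict.get? best image_name with
          | some dog_info => if dog_info.1 ≥ threshold then total + 1 else total
          | none => total) t
      = metaL.foldl (fun total entry =>
          if uniqueRepeatCount entry.2 ≥ threshold && PySem.Set.contains dogOk entry.1
          then total + 1 else total) t := by
  intro metaL
  induction metaL with
  | nil => intro t; rfl
  | cons e rest ih =>
    intro t
    obtain ⟨img, rows⟩ := e
    simp only [List.foldl_cons]
    have hstep :
        (if uniqueRepeatCount rows < threshold then t
         else
          match PySem.Dict.get? best img with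
          | some dog_info => if dog_info.1 ≥ threshold then t + 1 else t
          | none => t)
        = (if uniqueRepeatCount rows ≥ threshold && PySem.Set.contains dogOk img
           then t + 1 else t) := by
      by_cases hlt : uniqueRepeatCount rows < threshold
      · have : ¬ uniqueRepeatCount rows ≥ threshold := by omega
        simp [hlt, this]
      · have hr : uniqueRepeatCount rows ≥ threshold := by omega
        rw [← h img]
        cases hget : PySem.Dict.get? best img with
        | none => simp [hlt, hr, qualA, hget]
        | some info =>
          by_cases hc : info.1 ≥ threshold
          · simp [hlt, hr, qualA, hget, hc]
          · simp [hlt, hr, qualA, hget, hc]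
    rw [hstep]
    exact ih (if uniqueRepeatCount rows ≥ threshold && PySem.Set.contains dogOk img then t + 1 else t)

-- ===== VERDICT (by name: the statement is the Claim_ definition above) =====
theorem count_common_images_spec : Claim_equal_count_common_images := by
  intro meta_by_image dog_by_combo threshold _dom
  unfold Spec_count_common_images count_common_images count_common_images_alt
  exact meta_eq threshold _ _
    (dog_inv threshold dog_by_combo PySem.Dict.empty PySem.Set.empty
      (by intro img; simp [qualA, PySem.Dict.get?_empty, PySem.Set.empty])) meta_by_image 0
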